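-- pv_equiv track=rewrite | github.com/BioComputingUP/MobiDB-lite | src/mobidb_lite/consensus.py | get_regions
-- ===== SOURCE A (Python) =====
-- from typing import Union
--
-- _NEGATIVE_FLAG = "0"
--
-- def get_regions(states: Union[list, str], min_length: int) -> list:
--     # Return 0-indexed regions
--     regions = []
--     start = None
--     current_flag = None
--     for i, flag in enumerate(states):
--         if flag != current_flag:
--             if start is not None and current_flag != _NEGATIVE_FLAG:
--                 end = i - 1
--                 length = end - start + 1
--                 if length >= min_length:
--                     regions.append((start, end, current_flag))
--
--             start = i
--             current_flag = flag
--
--     if start is not None and current_flag != _NEGATIVE_FLAG: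
--         end = len(states) - 1
--         length = end - start + 1
--         if length >= min_length:
--             regions.append((start, end, current_flag))
--
--     return regions
-- ===== SOURCE B (Python) =====
-- _NEGATIVE_FLAG = "0"
--
-- def get_regions(states, min_length):
--     # Return 0-indexed regions
--     n = len(states)
--     starts = [i for i in range(n) if i == 0 or states[i] != states[i - 1]]
--     return [(s, e - 1, states[s])
--             for s, e in zip(starts, starts[1:] + [n])
--             if states[s] != _NEGATIVE_FLAG and e - s >= min_length]
-- ===== Notes on version B (the rewrite author's own statement) =====
-- stated objective: alternative
-- what changed: Replaces A's element-by-element state machine (pending start/current_flag with duplicated flush logic) by staged passes: first compute the list of run-start indices with an index comprehension, then pair consecutive starts via zip and emit qualifying regions in a second comprehension.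
import Mathlib
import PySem

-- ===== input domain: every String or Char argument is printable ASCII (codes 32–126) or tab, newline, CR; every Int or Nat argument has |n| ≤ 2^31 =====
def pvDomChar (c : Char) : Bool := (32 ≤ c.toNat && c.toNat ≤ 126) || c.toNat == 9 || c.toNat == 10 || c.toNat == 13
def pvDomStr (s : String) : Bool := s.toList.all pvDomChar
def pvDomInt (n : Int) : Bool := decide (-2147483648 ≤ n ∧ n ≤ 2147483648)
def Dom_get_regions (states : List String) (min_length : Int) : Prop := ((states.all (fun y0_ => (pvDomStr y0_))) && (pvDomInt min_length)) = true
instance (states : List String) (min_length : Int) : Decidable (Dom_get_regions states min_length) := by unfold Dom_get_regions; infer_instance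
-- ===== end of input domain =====

-- B replaces A's element-by-element state machine by staged passes: compute run-start
-- indices first, then pair consecutive starts with zip and emit qualifying regions.

-- ===== PORT A =====
-- A's final flush (duplicated logic after the loop); also used inside the loop with n = i.
def pvFlushA (m n : Int) :
    List (Int × Int × String) × Option Int × Option String → List (Int × Int × String)
  | (regions, start, cur) =>
    match start with
    | none => regions
    | some s =>
      if cur ≠ some "0" then
        if (n - 1) - s + 1 ≥ m then regions ++ [(s, n - 1, cur.getD "")] else regions
      else regions

-- the for loop of A, carrying the Python index i and the loop state
def pvLoopA (m : Int) :
    List String → Int → List (Int × Int × String) → Option Int → Option String →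
    List (Int × Int × String) × Option Int × Option String
  | [], _, regions, start, cur => (regions, start, cur)
  | flag :: rest, i, regions, start, cur =>
    if some flag ≠ cur then
      pvLoopA m rest (i + 1) (pvFlushA m i (regions, start, cur)) (some i) (some flag)
    else
      pvLoopA m rest (i + 1) regions start cur

def get_regions (states : List String) (min_length : Int) : List (Int × Int × String) :=
  pvFlushA min_length states.length (pvLoopA min_length states 0 [] none none)

-- ===== PORT B =====
-- starts = [i for i in range(n) if i == 0 or states[i] != states[i-1]]
def pvStartsB (states : List String) : List Int :=
  (PySem.List.pyRange 0 (states.length : Int) 1).filter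
    (fun i => i == 0 || !(PySem.List.pyGet? states i == PySem.List.pyGet? states (i - 1)))

-- [(s, e - 1, states[s]) for s, e in zip(starts, starts[1:] + [n]) if states[s] != "0" and e - s >= min_length]
def get_regions_alt (states : List String) (min_length : Int) : List (Int × Int × String) :=
  let n : Int := states.length
  let starts := pvStartsB states
  (starts.zip (PySem.List.slice starts (some 1) none ++ [n])).filterMap
    (fun p =>
      match PySem.List.pyGet? states p.1 with
      | some f => if f ≠ "0" ∧ p.2 - p.1 ≥ min_length then some (p.1, p.2 - 1, f) else none
      | none => none)

-- ===== PRECONDITION & SPEC =====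
def Spec_get_regions (states : List String) (min_length : Int) (out : List (Int × Int × String)) : Prop := out = get_regions_alt states min_length
instance (states : List String) (min_length : Int) (out : List (Int × Int × String)) : Decidable (Spec_get_regions states min_length out) := by unfold Spec_get_regions; infer_instance

-- ===== CLAIM (what is proved, stated in full; the proofs are below) =====
def Claim_equal_get_regions : Prop := ∀ (states : List String) (min_length : Int), Dom_get_regions states min_length → Spec_get_regions states min_length (get_regions states min_length)

-- ===== LEMMAS AND PROOFS =====

-- run-at-a-time middleman: both ports are proved equal to this
def pvGoB (m : Int) : List String → Int → List (Int × Int × String)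
  | [], _ => []
  | f :: rest, i =>
    let len : Int := 1 + (rest.takeWhile (· == f)).length
    (if f ≠ "0" ∧ len ≥ m then [(i, i + len - 1, f)] else [])
      ++ pvGoB m (rest.dropWhile (· == f)) (i + len)
termination_by l _ => l.length
decreasing_by simpa using Nat.lt_succ_of_le (List.length_dropWhile_le _ _)

-- Nat-indexed versions of B's staged data
def pvNatStarts (l : List String) : List Nat :=
  (List.range l.length).filter (fun i => i == 0 || !(l[i]? == l[i - 1]?))

def pvNatPairs (l : List String) : List (Nat × Nat) :=
  (pvNatStarts l).zip ((pvNatStarts l).drop 1 ++ [l.length])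

def pvEmit (l : List String) (m i : Int) (p : Nat × Nat) : Option (Int × Int × String) :=
  match l[p.1]? with
  | some f => if f ≠ "0" ∧ (p.2 : Int) - (p.1 : Int) ≥ m then some (i + p.1, i + p.2 - 1, f) else none
  | none => none

-- A-side lemmas (state machine → pvGoB) ---------------------------------------

lemma pvFlushA_some (m n s : Int) (f : String) (regions : List (Int × Int × String)) :
    pvFlushA m n (regions, some s, some f)
      = regions ++ (if f ≠ "0" ∧ n - s ≥ m then [(s, n - 1, f)] else []) := by
  by_cases hf : f = "0"
  · simp [pvFlushA, hf]
  · simp only [pvFlushA, Option.getD_some]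
    rw [if_pos (show (some f ≠ some "0") from by simp [hf])]
    by_cases hm : n - s ≥ m
    · rw [if_pos (by omega), if_pos ⟨hf, hm⟩]
    · rw [if_neg (by omega), if_neg (fun h => hm h.2), List.append_nil]

lemma pvLoopA_run (m : Int) : ∀ (states : List String) (i s : Int) (f : String)
    (regions : List (Int × Int × String)),
    pvFlushA m (i + states.length) (pvLoopA m states i regions (some s) (some f))
      = regions
        ++ (if f ≠ "0" ∧ i + ((states.takeWhile (· == f)).length : Int) - s ≥ m
            then [(s, i + ((states.takeWhile (· == f)).length : Int) - 1, f)] else [])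
        ++ pvGoB m (states.dropWhile (· == f)) (i + ((states.takeWhile (· == f)).length : Int)) := by
  intro states
  induction states with
  | nil =>
    intro i s f regions
    simp only [pvLoopA, List.length_nil, Nat.cast_zero, add_zero, List.takeWhile_nil,
      List.dropWhile_nil]
    rw [pvFlushA_some]
    simp [pvGoB]
  | cons g rest ih =>
    intro i s f regions
    by_cases hg : g = f
    · subst hg
      rw [show pvLoopA m (g :: rest) i regions (some s) (some g)
            = pvLoopA m rest (i + 1) regions (some s) (some g) by
          simp [pvLoopA]]
      rw [List.takeWhile_cons_of_pos (p := fun x => x == g) (by simp),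
        List.dropWhile_cons_of_pos (p := fun x => x == g) (by simp)]
      have h := ih (i + 1) s g regions
      simp only [List.length_cons] at h ⊢
      push_cast at h ⊢
      ring_nf at h ⊢
      exact h
    · rw [show pvLoopA m (g :: rest) i regions (some s) (some f)
            = pvLoopA m rest (i + 1) (pvFlushA m i (regions, some s, some f)) (some i) (some g) by
          simp [pvLoopA, hg]]
      rw [List.takeWhile_cons_of_neg (p := fun x => x == f) (by simp [hg]),
        List.dropWhile_cons_of_neg (p := fun x => x == f) (by simp [hg])]
      have h := ih (i + 1) i g (pvFlushA m i (regions, some s, some f))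
      rw [pvFlushA_some] at h
      rw [pvFlushA_some]
      simp only [List.length_nil, Nat.cast_zero, add_zero]
      rw [show pvGoB m (g :: rest) i
            = (if g ≠ "0" ∧ (1 : Int) + ((rest.takeWhile (· == g)).length : Int) ≥ m
               then [(i, i + (1 + ((rest.takeWhile (· == g)).length : Int)) - 1, g)] else [])
              ++ pvGoB m (rest.dropWhile (· == g)) (i + (1 + ((rest.takeWhile (· == g)).length : Int))) by
          simp [pvGoB]]
      simp only [List.length_cons, List.append_assoc] at h ⊢
      push_cast at h ⊢
      ring_nf at h ⊢
      exact h

lemma get_regions_eq_goB (states : List String) (m : Int) :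
    get_regions states m = pvGoB m states 0 := by
  cases states with
  | nil => simp [get_regions, pvLoopA, pvFlushA, pvGoB]
  | cons g rest =>
    unfold get_regions
    rw [show pvLoopA m (g :: rest) 0 [] none none
          = pvLoopA m rest 1 [] (some 0) (some g) by simp [pvLoopA, pvFlushA]]
    have h := pvLoopA_run m rest 1 0 g []
    rw [show pvGoB m (g :: rest) 0
          = (if g ≠ "0" ∧ (1 : Int) + ((rest.takeWhile (· == g)).length : Int) ≥ m
             then [(0, 0 + (1 + ((rest.takeWhile (· == g)).length : Int)) - 1, g)] else [])
            ++ pvGoB m (rest.dropWhile (· == g)) (0 + (1 + ((rest.takeWhile (· == g)).length : Int))) by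
        simp [pvGoB]]
    simp only [List.length_cons, List.nil_append] at h ⊢
    push_cast at h ⊢
    ring_nf at h ⊢
    exact h

-- B-side lemmas (staged passes → pvGoB) ---------------------------------------

-- the Int-index start list is the Nat-index one, cast
lemma pvStartsB_eq (l : List String) :
    pvStartsB l = (pvNatStarts l).map (fun k : Nat => (k : Int)) := by
  unfold pvStartsB pvNatStarts
  rw [PySem.List.pyRange_one]
  simp only [Int.sub_zero, Int.toNat_natCast, zero_add]
  rw [List.filter_map]
  refine congrArg (List.map (fun k : Nat => (k : Int))) ?_
  apply List.filter_congr
  intro k _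
  cases k with
  | zero => simp
  | succ j =>
    simp only [Function.comp]
    have h1 : PySem.List.pyGet? l ((j + 1 : Nat) : Int) = l[j + 1]? := by
      exact_mod_cast PySem.List.pyGet?_natCast l (j + 1)
    have h2 : ((j + 1 : Nat) : Int) - 1 = (j : Int) := by push_cast; ring
    rw [h1, h2, PySem.List.pyGet?_natCast]
    simp
    exact fun h => absurd h (by omega)

-- the first element of a dropWhile fails the predicate
lemma pv_dropWhile_zero_ne (p : String → Bool) (l : List String) (x : String)
    (h : (l.dropWhile p)[0]? = some x) : p x = false := by
  cases hd : l.dropWhile p with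
  | nil => rw [hd] at h; simp at h
  | cons a b =>
    rw [hd] at h
    simp only [List.getElem?_cons_zero, Option.some.injEq] at h
    subst h
    have := List.head_dropWhile_not p (l := l) (by rw [hd]; simp)
    simpa [hd] using this

-- run structure of the start list
lemma pvNatStarts_cons (g : String) (rest : List String) :
    pvNatStarts (g :: rest)
      = 0 :: (pvNatStarts ((g :: rest).dropWhile (· == g))).map
          (fun j => ((g :: rest).takeWhile (· == g)).length + j) := by
  set run := (g :: rest).takeWhile (· == g) with hrun
  set t := (g :: rest).dropWhile (· == g) with ht
  set k := run.length with hkdef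
  have hsplit : g :: rest = run ++ t := (List.takeWhile_append_dropWhile).symm
  have hk : 0 < k := by
    rw [hkdef, hrun, List.takeWhile_cons_of_pos (by simp)]; simp
  have hrg : ∀ i (_ : i < k), (g :: rest)[i]? = some g := by
    intro i hi
    rw [hsplit, List.getElem?_append_left hi, List.getElem?_eq_getElem hi]
    have := List.mem_takeWhile_imp (l := g :: rest) (p := (· == g)) (List.getElem_mem hi)
    simp only [beq_iff_eq] at this
    rw [this]
  have hti : ∀ j : Nat, (g :: rest)[k + j]? = t[j]? := by
    intro j
    rw [hsplit, List.getElem?_append_right (by omega)]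
    congr 1; omega
  have hlen : (g :: rest).length = k + t.length := by
    rw [hsplit, List.length_append]
  unfold pvNatStarts
  rw [hlen, List.range_add, List.filter_append]
  have h1 : (List.range k).filter (fun i => i == 0 || !((g :: rest)[i]? == (g :: rest)[i - 1]?))
      = [0] := by
    rw [List.filter_congr (q := fun i => i == 0) ?_]
    · rcases Nat.exists_eq_succ_of_ne_zero hk.ne' with ⟨kk, hkk⟩
      rw [hkk, List.range_succ_eq_map, List.filter_cons_of_pos (by simp), List.filter_map]
      simp [Function.comp]
    · intro i hi
      rw [List.mem_range] at hi
      cases i with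
      | zero => simp
      | succ j =>
        rw [hrg _ hi, hrg _ (by omega)]
        simp
  have h2 : ((List.range t.length).map (fun i => k + i)).filter
        (fun i => i == 0 || !((g :: rest)[i]? == (g :: rest)[i - 1]?))
      = ((List.range t.length).filter (fun i => i == 0 || !(t[i]? == t[i - 1]?))).map
          (fun j => k + j) := by
    rw [List.filter_map]
    congr 1
    apply List.filter_congr
    intro j hj
    rw [List.mem_range] at hj
    simp only [Function.comp]
    have hk0 : ((k + j == 0) : Bool) = false := by simp; omega
    cases j with
    | zero =>
      cases h0 : t[0]? with
      | none =>
        rw [List.getElem?_eq_none_iff] at h0; omega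
      | some x =>
        have hx : (x == g) = false := pv_dropWhile_zero_ne (· == g) (g :: rest) x (ht ▸ h0)
        rw [hk0, hti 0, show k + 0 - 1 = k - 1 by omega, hrg (k - 1) (by omega), h0]
        simp at hx
        simp [hx]
    | succ j' =>
      rw [hk0, hti (j' + 1), show k + (j' + 1) - 1 = k + j' by omega, hti j']
      simp
  rw [h1, h2]
  rfl

-- run structure of the zipped pairs
lemma pvNatPairs_cons (g : String) (rest : List String) :
    pvNatPairs (g :: rest)
      = (0, ((g :: rest).takeWhile (· == g)).length)
        :: (pvNatPairs ((g :: rest).dropWhile (· == g))).map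
             (Prod.map (((g :: rest).takeWhile (· == g)).length + ·)
                       (((g :: rest).takeWhile (· == g)).length + ·)) := by
  have hlen : (g :: rest).length
      = ((g :: rest).takeWhile (· == g)).length + ((g :: rest).dropWhile (· == g)).length := by
    rw [← List.length_append, List.takeWhile_append_dropWhile]
  unfold pvNatPairs
  rw [pvNatStarts_cons g rest, hlen]
  cases htt : (g :: rest).dropWhile (· == g) with
  | nil => simp [pvNatStarts]
  | cons a b =>
    rw [pvNatStarts_cons a b]
    generalize (pvNatStarts ((a :: b).dropWhile (· == a))).map
        (fun j => ((a :: b).takeWhile (· == a)).length + j) = W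
    simp only [List.map_cons, List.drop_succ_cons, List.drop_zero, Nat.add_zero]
    rw [← List.zip_map]
    simp

-- the two staged components, shifted past the first run
lemma pvEmit_shift (g : String) (rest : List String) (m i : Int) (p : Nat × Nat) :
    pvEmit (g :: rest) m i
        (Prod.map (((g :: rest).takeWhile (· == g)).length + ·)
                  (((g :: rest).takeWhile (· == g)).length + ·) p)
      = pvEmit ((g :: rest).dropWhile (· == g)) m
          (i + ((g :: rest).takeWhile (· == g)).length) p := by
  rcases p with ⟨a, b⟩
  set t := (g :: rest).dropWhile (· == g) with ht
  set k := ((g :: rest).takeWhile (· == g)).length with hk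
  have hti : (g :: rest)[k + a]? = t[a]? := by
    rw [show g :: rest = (g :: rest).takeWhile (· == g) ++ t from
        (List.takeWhile_append_dropWhile).symm,
      List.getElem?_append_right (by omega)]
    congr 1; omega
  unfold pvEmit
  simp only [Prod.map]
  rw [hti]
  cases t[a]? with
  | none => rfl
  | some f =>
    simp only
    by_cases hf : f = "0"
    · simp [hf]
    · by_cases hm : ((b : Int) - (a : Int) ≥ m)
      · rw [if_pos ⟨hf, by push_cast; omega⟩, if_pos ⟨hf, hm⟩]
        simp only [Option.some.injEq, Prod.mk.injEq]
        refine ⟨by push_cast; ring, by push_cast; ring, trivial⟩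
      · rw [if_neg (fun h => hm (by have := h.2; push_cast at this; omega)),
          if_neg (fun h => hm h.2)]

lemma pvEmit_head (g : String) (rest : List String) (m i : Int) :
    pvEmit (g :: rest) m i (0, ((g :: rest).takeWhile (· == g)).length)
      = if g ≠ "0" ∧ (((g :: rest).takeWhile (· == g)).length : Int) ≥ m
        then some (i, i + ((g :: rest).takeWhile (· == g)).length - 1, g) else none := by
  unfold pvEmit
  simp

-- pvGoB computes exactly the staged pipeline
lemma pvGoB_eq (m : Int) : ∀ (l : List String) (i : Int),
    pvGoB m l i = (pvNatPairs l).filterMap (pvEmit l m i) := by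
  suffices h : ∀ n (l : List String), l.length ≤ n → ∀ i,
      pvGoB m l i = (pvNatPairs l).filterMap (pvEmit l m i) by
    intro l i; exact h l.length l le_rfl i
  intro n
  induction n with
  | zero =>
    intro l hl i
    have : l = [] := List.length_eq_zero_iff.mp (Nat.le_zero.mp hl)
    subst this
    simp [pvGoB, pvNatPairs, pvNatStarts]
  | succ n ih =>
    intro l hl i
    cases l with
    | nil => simp [pvGoB, pvNatPairs, pvNatStarts]
    | cons g rest =>
      set t := (g :: rest).dropWhile (· == g) with ht
      set k := ((g :: rest).takeWhile (· == g)).length with hk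
      have hkcast : (k : Int) = 1 + ((rest.takeWhile (· == g)).length : Int) := by
        rw [hk, List.takeWhile_cons_of_pos (by simp)]
        push_cast [List.length_cons]; ring
      have htr : t = rest.dropWhile (· == g) := by
        rw [ht, List.dropWhile_cons_of_pos (by simp)]
      have hlt : t.length ≤ n := by
        rw [htr]
        have := List.length_dropWhile_le (· == g) rest
        simp only [List.length_cons] at hl
        omega
      rw [pvNatPairs_cons, List.filterMap_cons, List.filterMap_map, ← hk, ← ht,
        show (pvEmit (g :: rest) m i) ∘ (Prod.map (k + ·) (k + ·)) = pvEmit t m (i + k) from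
          funext fun p => pvEmit_shift g rest m i p,
        ← ih t hlt (i + k), pvEmit_head, ← hk]
      rw [show pvGoB m (g :: rest) i
            = (if g ≠ "0" ∧ (1 : Int) + ((rest.takeWhile (· == g)).length : Int) ≥ m
               then [(i, i + (1 + ((rest.takeWhile (· == g)).length : Int)) - 1, g)] else [])
              ++ pvGoB m (rest.dropWhile (· == g)) (i + (1 + ((rest.takeWhile (· == g)).length : Int))) by
          simp [pvGoB]]
      rw [← hkcast, ← htr]
      by_cases hc : g ≠ "0" ∧ (k : Int) ≥ m
      · rw [if_pos hc, if_pos hc]; rfl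
      · rw [if_neg hc, if_neg hc]; rfl

-- B's port computes exactly the staged pipeline (at offset 0)
lemma get_regions_alt_eq (l : List String) (m : Int) :
    get_regions_alt l m = (pvNatPairs l).filterMap (pvEmit l m 0) := by
  unfold get_regions_alt pvNatPairs
  simp only [pvStartsB_eq, PySem.List.slice_from_one]
  rw [show ((pvNatStarts l).map (fun k : Nat => (k : Int))).tail
        = ((pvNatStarts l).drop 1).map (fun k : Nat => (k : Int)) by
      rw [← List.drop_one, List.map_drop],
    show ([(l.length : Int)] : List Int) = ([l.length] : List Nat).map (fun k : Nat => (k : Int)) by simp,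
    ← List.map_append, List.zip_map, List.filterMap_map]
  apply List.filterMap_congr
  intro p _
  simp only [Function.comp, Prod.map]
  rcases p with ⟨a, b⟩
  simp only []
  rw [PySem.List.pyGet?_natCast]
  unfold pvEmit
  cases l[a]? with
  | none => rfl
  | some f => simp

-- ===== VERDICT (by name: the statement is the Claim_ definition above) =====
theorem get_regions_spec : Claim_equal_get_regions := by
  intro states m _
  show get_regions states m = get_regions_alt states m
  rw [get_regions_eq_goB, get_regions_alt_eq, pvGoB_eq]
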